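-- pv_equiv track=rewrite | github.com/liujinbf/gjs | notification_payloads.py | _pick_ai_focus_item
-- ===== SOURCE A (Python) =====
-- def _pick_ai_focus_item(signal_meta: dict, items: list[dict]) -> dict:
--     target_symbol = str(signal_meta.get("symbol", "") or "").strip().upper()
--     if target_symbol:
--         for item in items:
--             if str(item.get("symbol", "") or "").strip().upper() == target_symbol:
--                 return dict(item)
--     for item in items:
--         if str(item.get("symbol", "") or "").strip():
--             return dict(item)
--     return {}
-- ===== SOURCE B (Python) =====
-- def _pick_ai_focus_item(signal_meta: dict, items: list[dict]) -> dict: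
--     # Single pass: return immediately on a target match, otherwise remember the
--     # first item with a nonempty symbol and return it (or {}) after the loop.
--     target_symbol = str(signal_meta.get("symbol", "") or "").strip().upper()
--     fallback = None
--     for item in items:
--         sym = str(item.get("symbol", "") or "").strip().upper()
--         if target_symbol and sym == target_symbol:
--             return dict(item)
--         if fallback is None and sym:
--             fallback = item
--     return dict(fallback) if fallback is not None else {}
-- ===== Notes on version B (the rewrite author's own statement) =====
-- stated objective: simpler
-- what changed: A's two sequential scans (target-match scan, then first-nonempty-symbol scan) are merged into one pass that returns on a target match and keeps a first-nonempty fallback accumulator for after the loop.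
import Mathlib
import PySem

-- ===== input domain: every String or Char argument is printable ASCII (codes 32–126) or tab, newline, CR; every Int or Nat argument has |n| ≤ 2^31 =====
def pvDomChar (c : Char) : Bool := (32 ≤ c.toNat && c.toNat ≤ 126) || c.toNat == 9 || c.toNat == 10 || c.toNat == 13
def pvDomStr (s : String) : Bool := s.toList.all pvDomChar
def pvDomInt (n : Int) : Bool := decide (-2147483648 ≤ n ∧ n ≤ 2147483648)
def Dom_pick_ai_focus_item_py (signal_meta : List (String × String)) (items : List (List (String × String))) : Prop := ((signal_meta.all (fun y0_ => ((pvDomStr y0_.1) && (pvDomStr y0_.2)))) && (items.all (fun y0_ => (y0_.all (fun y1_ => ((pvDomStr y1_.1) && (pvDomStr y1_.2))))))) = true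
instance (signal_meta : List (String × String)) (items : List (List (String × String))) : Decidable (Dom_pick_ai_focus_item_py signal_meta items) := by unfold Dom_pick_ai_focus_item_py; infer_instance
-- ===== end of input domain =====

-- B merges A's two sequential scans (target match, then first nonempty symbol) into one
-- pass with a fallback accumulator; objective: simpler, same O(n) cost.


-- ===== PORT A =====
-- A's first loop: return dict(item) on the first item whose normalized symbol equals target.
-- dict(item) on an item that is already a dict is an identity copy → the item itself.
def pvA_loop1 (target : String) : List (List (String × String)) → Option (List (String × String))
  | [] => none
  | item :: rest =>
    if PySem.Str.upper (PySem.Str.strip ((PySem.Dict.mk item).getD "symbol" "")) = target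
    then some item else pvA_loop1 target rest

-- A's second loop: first item with a nonempty stripped symbol, else {}.
def pvA_loop2 : List (List (String × String)) → List (String × String)
  | [] => []
  | item :: rest =>
    if PySem.Str.strip ((PySem.Dict.mk item).getD "symbol" "") ≠ "" then item
    else pvA_loop2 rest

def pick_ai_focus_item_py (signal_meta : List (String × String)) (items : List (List (String × String))) : List (String × String) :=
  let target := PySem.Str.upper (PySem.Str.strip ((PySem.Dict.mk signal_meta).getD "symbol" ""))
  match (if target ≠ "" then pvA_loop1 target items else none) with
  | some d => d
  | none => pvA_loop2 items

-- ===== PORT B =====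
-- B's single loop: return on a target match; otherwise remember the first item with a
-- nonempty (normalized) symbol and return it — or {} — after the loop.
def pvB_loop (target : String) (fallback : Option (List (String × String))) :
    List (List (String × String)) → List (String × String)
  | [] => fallback.getD []
  | item :: rest =>
    let sym := PySem.Str.upper (PySem.Str.strip ((PySem.Dict.mk item).getD "symbol" ""))
    if target ≠ "" ∧ sym = target then item
    else pvB_loop target (if fallback.isNone ∧ sym ≠ "" then some item else fallback) rest

def pick_ai_focus_item_py_alt (signal_meta : List (String × String)) (items : List (List (String × String))) : List (String × String) :=
  pvB_loop (PySem.Str.upper (PySem.Str.strip ((PySem.Dict.mk signal_meta).getD "symbol" ""))) none items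

-- ===== PRECONDITION & SPEC =====
def Spec_pick_ai_focus_item_py (signal_meta : List (String × String)) (items : List (List (String × String))) (out : List (String × String)) : Prop := out = pick_ai_focus_item_py_alt signal_meta items
instance (signal_meta : List (String × String)) (items : List (List (String × String))) (out : List (String × String)) : Decidable (Spec_pick_ai_focus_item_py signal_meta items out) := by unfold Spec_pick_ai_focus_item_py; infer_instance

-- ===== CLAIM (what is proved, stated in full; the proofs are below) =====
def Claim_equal_pick_ai_focus_item_py : Prop := ∀ (signal_meta : List (String × String)) (items : List (List (String × String))), Dom_pick_ai_focus_item_py signal_meta items → Spec_pick_ai_focus_item_py signal_meta items (pick_ai_focus_item_py signal_meta items)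

-- ===== LEMMAS AND PROOFS =====
theorem upper_eq_empty_iff (s : String) : PySem.Str.upper s = "" ↔ s = "" := by
  constructor
  · intro h
    have := congrArg String.toList h
    simpa [PySem.Str.toList_upper, PySem.Chars.upper] using this
  · rintro rfl; rfl

-- Loop invariant: B's single pass computes A's first scan, falling back to the
-- recorded candidate (or A's second scan) when no target match exists.
theorem pvB_loop_eq (target : String) : ∀ (items : List (List (String × String)))
    (fallback : Option (List (String × String))),
    pvB_loop target fallback items =
      match (if target ≠ "" then pvA_loop1 target items else none) with
      | some d => d
      | none => fallback.getD (pvA_loop2 items)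
  | [], fallback => by
    cases fallback <;> simp [pvB_loop, pvA_loop1, pvA_loop2]
  | item :: rest, fallback => by
    have IH := pvB_loop_eq target rest
    by_cases htgt : target = ""
    · subst htgt
      simp only [pvB_loop, ne_eq, not_true_eq_false, false_and, if_false, IH]
      cases fallback with
      | some d => simp
      | none =>
        simp only [Option.isNone_none, true_and, pvA_loop2]
        by_cases hs : PySem.Str.strip ((PySem.Dict.mk item).getD "symbol" "") = ""
        · simp [hs, upper_eq_empty_iff]
        · simp [hs, upper_eq_empty_iff]
    · by_cases hm : PySem.Str.upper (PySem.Str.strip ((PySem.Dict.mk item).getD "symbol" "")) = target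
      · simp [pvB_loop, pvA_loop1, htgt, hm]
      · simp only [pvB_loop, htgt, ne_eq, not_false_eq_true, true_and, hm, if_false, IH, pvA_loop1]
        cases fallback with
        | some d => simp
        | none =>
          simp only [Option.isNone_none, true_and, pvA_loop2]
          by_cases hs : PySem.Str.strip ((PySem.Dict.mk item).getD "symbol" "") = ""
          · simp [hs, upper_eq_empty_iff]
          · simp [hs, upper_eq_empty_iff]

-- ===== VERDICT (by name: the statement is the Claim_ definition above) =====
theorem pick_ai_focus_item_py_spec : Claim_equal_pick_ai_focus_item_py := by
  intro signal_meta items _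
  unfold Spec_pick_ai_focus_item_py pick_ai_focus_item_py pick_ai_focus_item_py_alt
  rw [pvB_loop_eq]
  cases h : (if PySem.Str.upper (PySem.Str.strip ((PySem.Dict.mk signal_meta).getD "symbol" "")) ≠ ""
      then pvA_loop1 (PySem.Str.upper (PySem.Str.strip ((PySem.Dict.mk signal_meta).getD "symbol" ""))) items
      else none) <;> simp [h]
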